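-- pv_equiv track=rewrite | github.com/kavehfayyazi/rubiks-cube-solver | src/cube/utils.py | rotate_sublist
-- ===== SOURCE A (Python) =====
-- def rotate_sublist(big_list: list, indices: list, n: int) -> list:
--     """Rotates the indices sublist of big_list by n in a forward direction and returns a copy.
--
--     Args:
--         big_list (list): The original list.
--         indices (list): Positions to rotate within 'big_list'.
--         n (int): Number of forward rotations.
--     Returns:
--         list: A copy of big_list with the specified rotations applied.
--     """
--     result = big_list.copy()
--     sub_list = [big_list[i] for i in indices]
--     n = n % len(indices)
--     rotated = sub_list[-n:] + sub_list[:-n]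
--     for idx, val in zip(indices, rotated):
--         result[idx] = val
--     return result
-- ===== SOURCE B (Python) =====
-- def rotate_sublist(big_list: list, indices: list, n: int) -> list:
--     """Rotates the indices sublist of big_list by n forward; direct modular index mapping."""
--     L = len(indices)
--     m = n % L
--     result = big_list.copy()
--     for j, idx in enumerate(indices):
--         result[idx] = big_list[indices[(j - m) % L]]
--     return result
-- ===== Notes on version B (the rewrite author's own statement) =====
-- stated objective: alternative
-- what changed: B replaces A's extract-sublist / slice-concatenate / zip-back pipeline with a single enumerate pass that writes each rotated value directly via modular index arithmetic, never materialising the sub-list or the rotated copy.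
import Mathlib
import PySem

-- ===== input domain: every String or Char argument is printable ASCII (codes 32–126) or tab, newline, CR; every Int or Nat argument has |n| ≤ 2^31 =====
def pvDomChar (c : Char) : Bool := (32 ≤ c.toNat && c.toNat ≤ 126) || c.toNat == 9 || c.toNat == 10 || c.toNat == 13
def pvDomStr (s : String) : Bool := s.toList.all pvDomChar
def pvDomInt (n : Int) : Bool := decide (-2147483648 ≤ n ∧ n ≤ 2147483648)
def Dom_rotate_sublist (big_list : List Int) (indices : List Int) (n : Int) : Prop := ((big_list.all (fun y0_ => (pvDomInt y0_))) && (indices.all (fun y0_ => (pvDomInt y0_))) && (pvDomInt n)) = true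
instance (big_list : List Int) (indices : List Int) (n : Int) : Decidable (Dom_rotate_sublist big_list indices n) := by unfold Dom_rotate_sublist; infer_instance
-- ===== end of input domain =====

-- B replaces A's extract/slice-concat/zip-back pipeline by one direct modular index-mapping pass; equal on all in-range, nonempty-indices inputs.


-- ===== PORT A =====
def rotate_sublist (big_list : List Int) (indices : List Int) (n : Int) : List Int :=
  let result := big_list
  let sub_list := indices.map (fun i => PySem.List.pyGetD big_list i 0)
  let m := PySem.Int.mod n (indices.length : Int)
  let rotated := PySem.List.slice sub_list (some (-m)) none ++ PySem.List.slice sub_list none (some (-m))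
  (indices.zip rotated).foldl (fun res p => PySem.List.pySetD res p.1 p.2) result

-- ===== PORT B =====
def rotate_sublist_alt (big_list : List Int) (indices : List Int) (n : Int) : List Int :=
  let L : Int := indices.length
  let m := PySem.Int.mod n L
  (PySem.List.enumerate indices).foldl
    (fun res p => PySem.List.pySetD res p.2
      (PySem.List.pyGetD big_list (PySem.List.pyGetD indices (PySem.Int.mod (p.1 - m) L) 0) 0))
    big_list

-- ===== PRECONDITION & SPEC =====
-- Pre_ excludes exactly where the Python A raises: empty indices (ZeroDivisionError from n % 0)
-- and any index out of Python's range (IndexError); A returns on everything else.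
def Pre_rotate_sublist (big_list : List Int) (indices : List Int) (n : Int) : Prop :=
  indices ≠ [] ∧ ∀ i ∈ indices, PySem.Raise.InRange big_list.length i
instance (big_list : List Int) (indices : List Int) (n : Int) : Decidable (Pre_rotate_sublist big_list indices n) := by unfold Pre_rotate_sublist; infer_instance
def pvWitness_rotate_sublist : List Int × List Int × Int := ([10, 20, 30, 40], [0, 2, 3], 1)
def Spec_rotate_sublist (big_list : List Int) (indices : List Int) (n : Int) (out : List Int) : Prop := out = rotate_sublist_alt big_list indices n
instance (big_list : List Int) (indices : List Int) (n : Int) (out : List Int) : Decidable (Spec_rotate_sublist big_list indices n out) := by unfold Spec_rotate_sublist; infer_instance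

-- ===== CLAIM (what is proved, stated in full; the proofs are below) =====
def Claim_equal_rotate_sublist : Prop := ∀ (big_list : List Int) (indices : List Int) (n : Int), Dom_rotate_sublist big_list indices n → Pre_rotate_sublist big_list indices n → Spec_rotate_sublist big_list indices n (rotate_sublist big_list indices n)

-- ===== LEMMAS AND PROOFS =====

-- zip with a pointwise-characterised list equals a map over enumerate
theorem pv_zip_eq_map_enumerate {α β : Type} (g : Int → β) :
    ∀ (xs : List α) (s : Int) (v : List β), v.length = xs.length →
    (∀ j (h : j < v.length), v[j] = g (s + j)) →
    xs.zip v = (PySem.List.enumerate xs s).map (fun p => (p.2, g p.1)) := by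
  intro xs
  induction xs with
  | nil => intro s v h _; simp
  | cons x xs ih =>
    intro s v hlen hv
    cases v with
    | nil => simp at hlen
    | cons y v =>
      simp only [List.zip_cons_cons, PySem.List.enumerate_cons, List.map_cons]
      congr 1
      · have := hv 0 (by simp)
        simp at this
        simp [this]
      · apply ih (s + 1) v (by simpa using hlen)
        intro j h
        have := hv (j + 1) (by simpa using h)
        simpa [add_assoc, add_comm, add_left_comm] using this

theorem pv_main : ∀ (big_list : List Int) (indices : List Int) (n : Int), Pre_rotate_sublist big_list indices n → rotate_sublist big_list indices n = rotate_sublist_alt big_list indices n := by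
  intro big_list indices n hpre
  obtain ⟨hne, hin⟩ := hpre
  unfold rotate_sublist rotate_sublist_alt
  dsimp only
  set L : Nat := indices.length with hL
  have hLpos : 0 < L := by cases indices <;> simp_all
  set m : Int := PySem.Int.mod n (L : Int) with hm
  have hm0 : 0 ≤ m := PySem.Int.mod_nonneg _ (by exact_mod_cast hLpos)
  have hmL : m < (L : Int) := PySem.Int.mod_lt _ (by exact_mod_cast hLpos)
  set f : Int → Int := fun i => PySem.List.pyGetD big_list i 0 with hf
  set sub : List Int := indices.map f with hsub
  have hsublen : sub.length = L := by simp [hsub, hL]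
  set g : Int → Int := fun j =>
    PySem.List.pyGetD big_list (PySem.List.pyGetD indices (PySem.Int.mod (j - m) (L : Int)) 0) 0 with hg
  set rotated : List Int :=
    PySem.List.slice sub (some (-m)) none ++ PySem.List.slice sub none (some (-m)) with hrot
  -- characterise rotated: either the m = 0 identity case or a genuine drop/take rotation
  have hcases : (m = 0 ∧ rotated = sub) ∨ (0 < m.toNat ∧ rotated = sub.drop (L - m.toNat) ++ sub.take (L - m.toNat)) := by
    rcases eq_or_lt_of_le hm0 with h0 | hpos
    · refine Or.inl ⟨h0.symm, ?_⟩
      rw [hrot, ← h0]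
      norm_num [PySem.List.slice_none_none, PySem.List.slice_to]
    · right
      refine ⟨by omega, ?_⟩
      rw [hrot, show -m = -(m.toNat : Int) by omega,
        PySem.List.slice_from_neg_natCast sub m.toNat (by omega),
        PySem.List.slice_to_neg_natCast sub m.toNat (by omega), hsublen]
  have hrlen : rotated.length = L := by
    rcases hcases with ⟨_, h⟩ | ⟨hk, h⟩ <;> simp [h, hsublen]
  have hrget : ∀ j (h : j < rotated.length), rotated[j] = g (j : Int) := by
    intro j hj
    have hjL : j < L := by omega
    have hkL : m.toNat < L := by omega
    -- the source position in sub that A's rotation places at slot j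
    obtain ⟨r, hr⟩ : ∃ r : Nat, r = if j < m.toNat then j + L - m.toNat else j - m.toNat := ⟨_, rfl⟩
    have hrL : r < L := by rw [hr]; split_ifs <;> omega
    have hmod : PySem.Int.mod ((j : Int) - m) (L : Int) = (r : Int) := by
      rw [PySem.Int.mod_eq_emod_of_pos (by exact_mod_cast hLpos), hr]
      split_ifs with hc
      · rw [show (j : Int) - m = ((j + L - m.toNat : Nat) : Int) - L by omega,
          Int.sub_emod_right, Int.emod_eq_of_lt (by omega) (by omega)]
      · rw [Int.emod_eq_of_lt (by omega) (by omega)]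
        omega
    have hidx : PySem.List.pyGetD indices ((r : Nat) : Int) 0 = indices[r]'(by omega) := by
      rw [PySem.List.pyGetD_natCast]
      exact List.getD_eq_getElem _ _ (by omega)
    have hgval : g (j : Int) = sub[r]'(by omega) := by
      simp only [hg, hmod, hidx, hsub, hf, List.getElem_map]
    rw [hgval]
    rcases hcases with ⟨hm0', h⟩ | ⟨hk, h⟩
    · exact getElem_congr h (by rw [hr]; split_ifs <;> omega) hj
    · have h' : rotated[j] = (sub.drop (L - m.toNat) ++ sub.take (L - m.toNat))[j]'(h ▸ hj) :=
        getElem_congr h rfl hj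
      rw [h', List.getElem_append]
      split_ifs with hsplit
      · rw [List.getElem_drop]
        exact getElem_congr rfl (by rw [hr]; simp only [List.length_drop, hsublen] at hsplit ⊢; split_ifs <;> omega) _
      · rw [List.getElem_take]
        exact getElem_congr rfl (by rw [hr]; simp only [List.length_drop, hsublen] at hsplit ⊢; split_ifs <;> omega) _
  have hzip : indices.zip rotated =
      (PySem.List.enumerate indices 0).map (fun p => (p.2, g p.1)) := by
    apply pv_zip_eq_map_enumerate g indices 0 rotated (by omega)
    intro j h
    simpa using hrget j h
  rw [hzip, List.foldl_map]

-- ===== VERDICT (by name: the statement is the Claim_ definition above) =====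
theorem rotate_sublist_spec : Claim_equal_rotate_sublist := by
  intro big_list indices n _ hpre
  exact pv_main big_list indices n hpre
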